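-- pv_equiv track=rewrite | github.com/Liruitao1993/South_Network_Protocol_Analysis_Tool | validator/base.py | _calc_crc16_ccitt
-- ===== SOURCE A (Python) =====
-- def _calc_crc16_ccitt(data: bytes) -> int:
--     """计算 CRC16-CCITT 校验（初始值0xFFFF，最终异或0xFFFF）"""
--     crc_table = [
--         0x0000, 0x1189, 0x2312, 0x329b, 0x4624, 0x57ad, 0x6536, 0x74bf,
--         0x8c48, 0x9dc1, 0xaf5a, 0xbed3, 0xca6c, 0xdbe5, 0xe97e, 0xf8f7,
--         0x1081, 0x0108, 0x3393, 0x221a, 0x56a5, 0x472c, 0x75b7, 0x643e,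
--         0x9cc9, 0x8d40, 0xbfdb, 0xae52, 0xdaed, 0xcb64, 0xf9ff, 0xe876,
--         0x2102, 0x308b, 0x0210, 0x1399, 0x6726, 0x76af, 0x4434, 0x55bd,
--         0xad4a, 0xbcc3, 0x8e58, 0x9fd1, 0xeb6e, 0xfae7, 0xc87c, 0xd9f5,
--         0x3183, 0x200a, 0x1291, 0x0318, 0x77a7, 0x662e, 0x54b5, 0x453c,
--         0xbdcb, 0xac42, 0x9ed9, 0x8f50, 0xfbef, 0xea66, 0xd8fd, 0xc974,
--         0x4204, 0x538d, 0x6116, 0x709f, 0x0420, 0x15a9, 0x2732, 0x36bb,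
--         0xce4c, 0xdfc5, 0xed5e, 0xfcd7, 0x8868, 0x99e1, 0xab7a, 0xbaf3,
--         0x5285, 0x430c, 0x7197, 0x601e, 0x14a1, 0x0528, 0x37b3, 0x263a,
--         0xdecd, 0xcf44, 0xfddf, 0xec56, 0x98e9, 0x8960, 0xbbfb, 0xaa72,
--         0x6306, 0x728f, 0x4014, 0x519d, 0x2522, 0x34ab, 0x0630, 0x17b9,
--         0xef4e, 0xfec7, 0xcc5c, 0xddd5, 0xa96a, 0xb8e3, 0x8a78, 0x9bf1,
--         0x7387, 0x620e, 0x5095, 0x411c, 0x35a3, 0x242a, 0x16b1, 0x0738,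
--         0xffcf, 0xee46, 0xdcdd, 0xcd54, 0xb9eb, 0xa862, 0x9af9, 0x8b70,
--         0x8408, 0x9581, 0xa71a, 0xb693, 0xc22c, 0xd3a5, 0xe13e, 0xf0b7,
--         0x0840, 0x19c9, 0x2b52, 0x3adb, 0x4e64, 0x5fed, 0x6d76, 0x7cff,
--         0x9489, 0x8500, 0xb79b, 0xa612, 0xd2ad, 0xc324, 0xf1bf, 0xe036,
--         0x18c1, 0x0948, 0x3bd3, 0x2a5a, 0x5ee5, 0x4f6c, 0x7df7, 0x6c7e,
--         0xa50a, 0xb483, 0x8618, 0x9791, 0xe32e, 0xf2a7, 0xc03c, 0xd1b5,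
--         0x2942, 0x38cb, 0x0a50, 0x1bd9, 0x6f66, 0x7eef, 0x4c74, 0x5dfd,
--         0xb58b, 0xa402, 0x9699, 0x8710, 0xf3af, 0xe226, 0xd0bd, 0xc134,
--         0x39c3, 0x284a, 0x1ad1, 0x0b58, 0x7fe7, 0x6e6e, 0x5cf5, 0x4d7c,
--         0xc60c, 0xd785, 0xe51e, 0xf497, 0x8028, 0x91a1, 0xa33a, 0xb2b3,
--         0x4a44, 0x5bcd, 0x6956, 0x78df, 0x0c60, 0x1de9, 0x2f72, 0x3efb,
--         0xd68d, 0xc704, 0xf59f, 0xe416, 0x90a9, 0x8120, 0xb3bb, 0xa232,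
--         0x5ac5, 0x4b4c, 0x79d7, 0x685e, 0x1ce1, 0x0d68, 0x3ff3, 0x2e7a,
--         0xe70e, 0xf687, 0xc41c, 0xd595, 0xa12a, 0xb0a3, 0x8238, 0x93b1,
--         0x6b46, 0x7acf, 0x4854, 0x59dd, 0x2d62, 0x3ceb, 0x0e70, 0x1ff9,
--         0xf78f, 0xe606, 0xd49d, 0xc514, 0xb1ab, 0xa022, 0x92b9, 0x8330,
--         0x7bc7, 0x6a4e, 0x58d5, 0x495c, 0x3de3, 0x2c6a, 0x1ef1, 0x0f78
--     ]
--     fcs = 0xFFFF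
--     for byte in data:
--         fcs = ((fcs >> 8) ^ crc_table[(fcs ^ byte) & 0xFF]) & 0xFFFF
--     return fcs ^ 0xFFFF
-- ===== SOURCE B (Python) =====
-- def _calc_crc16_ccitt(data: bytes) -> int:
--     """计算 CRC16-CCITT 校验（初始值0xFFFF，最终异或0xFFFF）— bit-by-bit, no lookup table"""
--     fcs = 0xFFFF
--     for byte in data:
--         fcs ^= byte & 0xFF
--         for _ in range(8):
--             if fcs & 1:
--                 fcs = (fcs >> 1) ^ 0x8408
--             else:
--                 fcs >>= 1
--     return fcs ^ 0xFFFF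
-- ===== Notes on version B (the rewrite author's own statement) =====
-- stated objective: simpler
-- what changed: Replaced the 256-entry lookup table with the plain bit-by-bit reflected CRC16 loop: fcs ^= byte & 0xFF, then eight rounds of shift-right-and-conditionally-xor 0x8408.
import Mathlib
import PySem

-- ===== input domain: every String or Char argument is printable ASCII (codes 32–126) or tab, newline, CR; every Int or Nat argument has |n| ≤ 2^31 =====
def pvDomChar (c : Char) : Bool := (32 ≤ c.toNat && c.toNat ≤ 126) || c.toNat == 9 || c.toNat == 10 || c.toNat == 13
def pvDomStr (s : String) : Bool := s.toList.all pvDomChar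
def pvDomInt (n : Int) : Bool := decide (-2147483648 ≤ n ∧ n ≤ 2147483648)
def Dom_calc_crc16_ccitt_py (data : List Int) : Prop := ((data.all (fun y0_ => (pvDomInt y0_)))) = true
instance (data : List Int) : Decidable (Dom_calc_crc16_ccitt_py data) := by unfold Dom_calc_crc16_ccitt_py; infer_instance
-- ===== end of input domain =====

-- B replaces A's 256-entry lookup table by the plain bit-by-bit reflected CRC16-CCITT loop
-- (fcs ^= byte & 0xFF; 8 rounds of shift-and-conditionally-xor 0x8408): same value, no table.

-- ===== PORT A =====
def crcTable : List Int := [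
  0x0000, 0x1189, 0x2312, 0x329b, 0x4624, 0x57ad, 0x6536, 0x74bf,
  0x8c48, 0x9dc1, 0xaf5a, 0xbed3, 0xca6c, 0xdbe5, 0xe97e, 0xf8f7,
  0x1081, 0x0108, 0x3393, 0x221a, 0x56a5, 0x472c, 0x75b7, 0x643e,
  0x9cc9, 0x8d40, 0xbfdb, 0xae52, 0xdaed, 0xcb64, 0xf9ff, 0xe876,
  0x2102, 0x308b, 0x0210, 0x1399, 0x6726, 0x76af, 0x4434, 0x55bd,
  0xad4a, 0xbcc3, 0x8e58, 0x9fd1, 0xeb6e, 0xfae7, 0xc87c, 0xd9f5,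
  0x3183, 0x200a, 0x1291, 0x0318, 0x77a7, 0x662e, 0x54b5, 0x453c,
  0xbdcb, 0xac42, 0x9ed9, 0x8f50, 0xfbef, 0xea66, 0xd8fd, 0xc974,
  0x4204, 0x538d, 0x6116, 0x709f, 0x0420, 0x15a9, 0x2732, 0x36bb,
  0xce4c, 0xdfc5, 0xed5e, 0xfcd7, 0x8868, 0x99e1, 0xab7a, 0xbaf3,
  0x5285, 0x430c, 0x7197, 0x601e, 0x14a1, 0x0528, 0x37b3, 0x263a,
  0xdecd, 0xcf44, 0xfddf, 0xec56, 0x98e9, 0x8960, 0xbbfb, 0xaa72,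
  0x6306, 0x728f, 0x4014, 0x519d, 0x2522, 0x34ab, 0x0630, 0x17b9,
  0xef4e, 0xfec7, 0xcc5c, 0xddd5, 0xa96a, 0xb8e3, 0x8a78, 0x9bf1,
  0x7387, 0x620e, 0x5095, 0x411c, 0x35a3, 0x242a, 0x16b1, 0x0738,
  0xffcf, 0xee46, 0xdcdd, 0xcd54, 0xb9eb, 0xa862, 0x9af9, 0x8b70,
  0x8408, 0x9581, 0xa71a, 0xb693, 0xc22c, 0xd3a5, 0xe13e, 0xf0b7,
  0x0840, 0x19c9, 0x2b52, 0x3adb, 0x4e64, 0x5fed, 0x6d76, 0x7cff,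
  0x9489, 0x8500, 0xb79b, 0xa612, 0xd2ad, 0xc324, 0xf1bf, 0xe036,
  0x18c1, 0x0948, 0x3bd3, 0x2a5a, 0x5ee5, 0x4f6c, 0x7df7, 0x6c7e,
  0xa50a, 0xb483, 0x8618, 0x9791, 0xe32e, 0xf2a7, 0xc03c, 0xd1b5,
  0x2942, 0x38cb, 0x0a50, 0x1bd9, 0x6f66, 0x7eef, 0x4c74, 0x5dfd,
  0xb58b, 0xa402, 0x9699, 0x8710, 0xf3af, 0xe226, 0xd0bd, 0xc134,
  0x39c3, 0x284a, 0x1ad1, 0x0b58, 0x7fe7, 0x6e6e, 0x5cf5, 0x4d7c,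
  0xc60c, 0xd785, 0xe51e, 0xf497, 0x8028, 0x91a1, 0xa33a, 0xb2b3,
  0x4a44, 0x5bcd, 0x6956, 0x78df, 0x0c60, 0x1de9, 0x2f72, 0x3efb,
  0xd68d, 0xc704, 0xf59f, 0xe416, 0x90a9, 0x8120, 0xb3bb, 0xa232,
  0x5ac5, 0x4b4c, 0x79d7, 0x685e, 0x1ce1, 0x0d68, 0x3ff3, 0x2e7a,
  0xe70e, 0xf687, 0xc41c, 0xd595, 0xa12a, 0xb0a3, 0x8238, 0x93b1,
  0x6b46, 0x7acf, 0x4854, 0x59dd, 0x2d62, 0x3ceb, 0x0e70, 0x1ff9,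
  0xf78f, 0xe606, 0xd49d, 0xc514, 0xb1ab, 0xa022, 0x92b9, 0x8330,
  0x7bc7, 0x6a4e, 0x58d5, 0x495c, 0x3de3, 0x2c6a, 0x1ef1, 0x0f78
]

-- Python indexes crc_table[(fcs ^ byte) & 0xFF]; the index is always in [0, 255], so the
-- lookup never raises and pyGetD is exact here.
def crcStepA (fcs byte : Int) : Int :=
  PySem.Int.band
    (PySem.Int.bxor (fcs >>> (8 : Nat))
      (PySem.List.pyGetD crcTable (PySem.Int.band (PySem.Int.bxor fcs byte) 255) 0))
    65535

def calc_crc16_ccitt_py (data : List Int) : Int :=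
  PySem.Int.bxor (data.foldl crcStepA 0xFFFF) 0xFFFF

-- ===== PORT B =====
-- one iteration of B's inner `for _ in range(8)` loop
def crcRoundB (fcs : Int) : Int :=
  if PySem.Int.band fcs 1 ≠ 0 then PySem.Int.bxor (fcs >>> (1 : Nat)) 0x8408 else fcs >>> (1 : Nat)

def crcStepB (fcs byte : Int) : Int :=
  crcRoundB^[8] (PySem.Int.bxor fcs (PySem.Int.band byte 255))

def calc_crc16_ccitt_py_alt (data : List Int) : Int :=
  PySem.Int.bxor (data.foldl crcStepB 0xFFFF) 0xFFFF

-- ===== PRECONDITION & SPEC =====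
def Spec_calc_crc16_ccitt_py (data : List Int) (out : Int) : Prop := out = calc_crc16_ccitt_py_alt data
instance (data : List Int) (out : Int) : Decidable (Spec_calc_crc16_ccitt_py data out) := by unfold Spec_calc_crc16_ccitt_py; infer_instance

-- ===== CLAIM (what is proved, stated in full; the proofs are below) =====
def Claim_equal_calc_crc16_ccitt_py : Prop := ∀ (data : List Int), Dom_calc_crc16_ccitt_py data → Spec_calc_crc16_ccitt_py data (calc_crc16_ccitt_py data)

-- ===== LEMMAS AND PROOFS =====

-- Nat-level model of one CRC round (B's inner-loop body on nonnegative values)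
def roundN (y : Nat) : Nat := if y &&& 1 = 1 then (y >>> 1) ^^^ 0x8408 else y >>> 1

lemma xor_lc (x y z : Nat) : x ^^^ (y ^^^ z) = y ^^^ (x ^^^ z) := by
  rw [← Nat.xor_assoc, Nat.xor_comm x y, Nat.xor_assoc]

lemma roundN_xor (a b : Nat) : roundN (a ^^^ b) = roundN a ^^^ roundN b := by
  have hd : (a ^^^ b) &&& 1 = (a &&& 1) ^^^ (b &&& 1) := Nat.and_xor_distrib_right (a := a) (b := b) (c := 1)
  have ha := Nat.and_one_is_mod a
  have hb := Nat.and_one_is_mod b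
  rcases Nat.mod_two_eq_zero_or_one a with h | h <;>
    rcases Nat.mod_two_eq_zero_or_one b with h' | h' <;>
      simp [roundN, hd, ha, hb, h, h', Nat.shiftRight_xor_distrib, xor_lc,
            Nat.xor_assoc, Nat.xor_comm]

lemma roundN_two_mul (h : Nat) : roundN (2 * h) = h := by
  have h2 : (2 * h) % 2 = 0 := Nat.mul_mod_right 2 h
  unfold roundN
  rw [Nat.and_one_is_mod, h2, if_neg (by norm_num), Nat.shiftRight_one]
  omega

lemma iterate_roundN_two_pow : ∀ (k h : Nat), roundN^[k] (2 ^ k * h) = h := by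
  intro k
  induction k with
  | zero => intro h; simp
  | succ k ih =>
    intro h
    rw [Function.iterate_succ_apply, show 2 ^ (k + 1) * h = 2 * (2 ^ k * h) by ring,
        roundN_two_mul]
    exact ih h

lemma iterate_roundN_xor : ∀ (k a b : Nat), roundN^[k] (a ^^^ b) = roundN^[k] a ^^^ roundN^[k] b := by
  intro k
  induction k with
  | zero => intro a b; simp
  | succ k ih =>
    intro a b
    rw [Function.iterate_succ_apply, Function.iterate_succ_apply, Function.iterate_succ_apply,
        roundN_xor, ih]

lemma mul_add_eq_xor (a b : Nat) (hb : b < 256) : 256 * a ^^^ b = 256 * a + b := by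
  apply Nat.eq_of_testBit_eq
  intro j
  have h256 : (256 : Nat) = 2 ^ 8 := rfl
  have h1 : (2 ^ 8 * a + b).testBit j = if j < 8 then b.testBit j else a.testBit (j - 8) :=
    Nat.testBit_two_pow_mul_add a (by omega) j
  have h0 : (2 ^ 8 * a + 0).testBit j = if j < 8 then Nat.testBit 0 j else a.testBit (j - 8) :=
    Nat.testBit_two_pow_mul_add a (by norm_num) j
  rw [Nat.testBit_xor, h256, h1]
  rw [show 2 ^ 8 * a = 2 ^ 8 * a + 0 from rfl, h0]
  by_cases hj : j < 8
  · simp [hj]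
  · simp [hj, Nat.testBit_lt_two_pow (show b < 2 ^ j by
      have : (256 : Nat) ≤ 2 ^ j := by
        calc (256 : Nat) = 2 ^ 8 := rfl
        _ ≤ 2 ^ j := Nat.pow_le_pow_right (by norm_num) (by omega)
      omega)]

lemma rounds8_split (x : Nat) : roundN^[8] x = (x >>> 8) ^^^ roundN^[8] (x &&& 255) := by
  have hx : x = 2 ^ 8 * (x >>> 8) ^^^ (x &&& 255) := by
    have hm : x &&& 255 = x % 256 := by
      have : (255 : Nat) = 2 ^ 8 - 1 := rfl
      rw [this, Nat.and_two_pow_sub_one_eq_mod]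
    have hs : x >>> 8 = x / 256 := by
      rw [Nat.shiftRight_eq_div_pow]
    rw [hm, hs, show (2:Nat) ^ 8 = 256 from rfl,
        mul_add_eq_xor _ _ (Nat.mod_lt _ (by norm_num))]
    omega
  conv_lhs => rw [hx]
  rw [iterate_roundN_xor, iterate_roundN_two_pow]

set_option maxRecDepth 10000 in
lemma table_eq : ∀ i : Nat, i < 256 → crcTable.getD i 0 = ((roundN^[8] i : Nat) : Int) := by decide

set_option maxRecDepth 10000 in
lemma table_lt : ∀ i : Nat, i < 256 → roundN^[8] i < 65536 := by decide

lemma roundN_lt (y : Nat) (hy : y < 65536) : roundN y < 65536 := by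
  have hs : y >>> 1 = y / 2 := Nat.shiftRight_one y
  unfold roundN
  split_ifs
  · have : y >>> 1 < 65536 := by omega
    have h16 : (65536 : Nat) = 2 ^ 16 := rfl
    rw [h16] at this ⊢
    exact Nat.xor_lt_two_pow this (by norm_num)
  · omega

lemma iterate_roundN_lt : ∀ (k y : Nat), y < 65536 → roundN^[k] y < 65536 := by
  intro k
  induction k with
  | zero => intro y hy; simpa using hy
  | succ k ih =>
    intro y hy
    rw [Function.iterate_succ_apply]
    exact ih _ (roundN_lt y hy)

set_option maxRecDepth 10000 in
lemma sub255 (y : Nat) : 255 - (255 &&& y) = 255 ^^^ (y &&& 255) := by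
  have h1 : 255 &&& y = y &&& 255 := Nat.and_comm 255 y
  have h2 : y &&& 255 ≤ 255 := Nat.and_le_right
  have key : ∀ z : Nat, z < 256 → 255 - z = 255 ^^^ z := by decide
  rw [h1, key _ (by omega)]

-- facts about byte & 0xFF and (fcs ^ byte) & 0xFF for an arbitrary Int byte
lemma band_facts (b : Int) :
    ∃ bn : Nat, bn < 256 ∧ PySem.Int.band b 255 = (bn : Int) ∧
      ∀ f : Nat, PySem.Int.band (PySem.Int.bxor (f : Int) b) 255 = (((f ^^^ bn) &&& 255 : Nat) : Int) := by
  rcases Int.lt_or_le b 0 with hb | hb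
  · -- byte < 0: two's-complement cases of PySem.Int.band / bxor
    have hm0 : (0 : Int) ≤ -b - 1 := by omega
    refine ⟨255 - (255 &&& (-b - 1).toNat), by omega, ?_, ?_⟩
    · rw [PySem.Int.band.eq_1, if_neg (by omega), if_pos (by norm_num)]
      rfl
    · intro f
      have hx : PySem.Int.bxor (f : Int) b = -(((f ^^^ (-b - 1).toNat) : Nat) : Int) - 1 := by
        rw [PySem.Int.bxor.eq_1, if_pos (Int.natCast_nonneg f), if_neg (by omega)]
        simp
      rw [hx, PySem.Int.band.eq_1,
          if_neg (by have := Int.natCast_nonneg (f ^^^ (-b - 1).toNat); omega),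
          if_pos (by norm_num)]
      have hsimp : (-(-(((f ^^^ (-b - 1).toNat) : Nat) : Int) - 1) - 1).toNat = f ^^^ (-b - 1).toNat := by
        omega
      rw [hsimp, show (255 : Int).toNat = 255 from rfl]
      congr 1
      rw [sub255, sub255, Nat.and_xor_distrib_right, Nat.and_xor_distrib_right,
          Nat.and_xor_distrib_right, Nat.and_self, Nat.and_assoc, Nat.and_self,
          ← Nat.xor_assoc, Nat.xor_comm (255 : Nat) (f &&& 255), Nat.xor_assoc]
  · -- byte ≥ 0
    refine ⟨b.toNat &&& 255, by have := Nat.and_le_right (n := b.toNat) (m := 255); omega, ?_, ?_⟩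
    · have h := PySem.Int.band_of_nonneg (a := b) (b := 255) hb (by norm_num)
      simpa using h
    · intro f
      have hx : PySem.Int.bxor (f : Int) b = ((f ^^^ b.toNat : Nat) : Int) := by
        have h := PySem.Int.bxor_of_nonneg (a := (f : Int)) (b := b) (Int.natCast_nonneg f) hb
        simpa using h
      rw [hx]
      have h2 : PySem.Int.band ((f ^^^ b.toNat : Nat) : Int) 255 = (((f ^^^ b.toNat) &&& 255 : Nat) : Int) := by
        exact_mod_cast PySem.Int.band_natCast (f ^^^ b.toNat) 255
      rw [h2]
      congr 1
      rw [Nat.and_xor_distrib_right, Nat.and_xor_distrib_right, Nat.and_assoc, Nat.and_self]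

lemma crcRoundB_natCast (x : Nat) : crcRoundB (x : Int) = ((roundN x : Nat) : Int) := by
  have hband : PySem.Int.band (x : Int) 1 = ((x &&& 1 : Nat) : Int) := by
    exact_mod_cast PySem.Int.band_natCast x 1
  have hshift : (x : Int) >>> (1 : Nat) = ((x >>> 1 : Nat) : Int) := (Int.natCast_shiftRight x 1).symm
  have hm := Nat.and_one_is_mod x
  unfold crcRoundB roundN
  rcases Nat.mod_two_eq_zero_or_one x with h | h
  · rw [hband, hm, h, hshift, if_neg (by simp), if_neg (by norm_num)]
  · have hx : PySem.Int.bxor ((x >>> 1 : Nat) : Int) 0x8408 = (((x >>> 1) ^^^ 0x8408 : Nat) : Int) := by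
      exact_mod_cast PySem.Int.bxor_natCast (x >>> 1) 0x8408
    rw [hband, hm, h, hshift, if_pos (by simp), if_pos rfl, hx]

lemma iterate_crcRoundB_natCast : ∀ (k : Nat) (x : Nat), crcRoundB^[k] (x : Int) = ((roundN^[k] x : Nat) : Int) := by
  intro k
  induction k with
  | zero => intro x; simp
  | succ k ih =>
    intro x
    rw [Function.iterate_succ_apply, Function.iterate_succ_apply, crcRoundB_natCast, ih]

lemma step_eq (f : Nat) (hf : f < 65536) (b : Int) :
    crcStepA (f : Int) b = crcStepB (f : Int) b ∧
      ∃ g : Nat, crcStepB (f : Int) b = (g : Int) ∧ g < 65536 := by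
  obtain ⟨bn, hbn, hband, hidx⟩ := band_facts b
  have hxlt : f ^^^ bn < 65536 := by
    have h16 : (65536 : Nat) = 2 ^ 16 := rfl
    rw [h16]
    exact Nat.xor_lt_two_pow (by omega) (by omega)
  have hB : crcStepB (f : Int) b = ((roundN^[8] (f ^^^ bn) : Nat) : Int) := by
    unfold crcStepB
    rw [hband]
    have hx : PySem.Int.bxor (f : Int) (bn : Int) = ((f ^^^ bn : Nat) : Int) := by
      exact_mod_cast PySem.Int.bxor_natCast f bn
    rw [hx, iterate_crcRoundB_natCast]
  have hilt : (f ^^^ bn) &&& 255 < 256 := by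
    have := Nat.and_le_right (n := f ^^^ bn) (m := 255)
    omega
  have hA : crcStepA (f : Int) b = ((roundN^[8] (f ^^^ bn) : Nat) : Int) := by
    unfold crcStepA
    rw [hidx f]
    rw [PySem.List.pyGetD_natCast, table_eq _ hilt]
    have hshift : (f : Int) >>> (8 : Nat) = ((f >>> 8 : Nat) : Int) := (Int.natCast_shiftRight f 8).symm
    rw [hshift]
    have hx : PySem.Int.bxor ((f >>> 8 : Nat) : Int) ((roundN^[8] ((f ^^^ bn) &&& 255) : Nat) : Int)
        = (((f >>> 8) ^^^ roundN^[8] ((f ^^^ bn) &&& 255) : Nat) : Int) := by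
      exact_mod_cast PySem.Int.bxor_natCast (f >>> 8) (roundN^[8] ((f ^^^ bn) &&& 255))
    rw [hx]
    have hb2 : PySem.Int.band (((f >>> 8) ^^^ roundN^[8] ((f ^^^ bn) &&& 255) : Nat) : Int) 65535
        = ((((f >>> 8) ^^^ roundN^[8] ((f ^^^ bn) &&& 255)) &&& 65535 : Nat) : Int) := by
      exact_mod_cast PySem.Int.band_natCast ((f >>> 8) ^^^ roundN^[8] ((f ^^^ bn) &&& 255)) 65535
    rw [hb2]
    -- the & 0xFFFF mask is a no-op, and the table step equals eight bit rounds
    have hzlt : (f >>> 8) ^^^ roundN^[8] ((f ^^^ bn) &&& 255) < 65536 := by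
      have h1 : f >>> 8 < 65536 := by
        rw [Nat.shiftRight_eq_div_pow]; omega
      have h2 := table_lt _ hilt
      have h16 : (65536 : Nat) = 2 ^ 16 := rfl
      rw [h16] at h1 h2 ⊢
      exact Nat.xor_lt_two_pow h1 h2
    have hmask : ((f >>> 8) ^^^ roundN^[8] ((f ^^^ bn) &&& 255)) &&& 65535
        = (f >>> 8) ^^^ roundN^[8] ((f ^^^ bn) &&& 255) := by
      have : (65535 : Nat) = 2 ^ 16 - 1 := rfl
      rw [this, Nat.and_two_pow_sub_one_eq_mod, Nat.mod_eq_of_lt hzlt]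
    rw [hmask]
    -- (f ^^^ bn) >>> 8 = f >>> 8 since bn < 256
    have hsh : (f ^^^ bn) >>> 8 = f >>> 8 := by
      rw [Nat.shiftRight_xor_distrib, Nat.shiftRight_eq_div_pow bn,
          Nat.div_eq_of_lt (by omega), Nat.xor_zero]
    rw [rounds8_split (f ^^^ bn), hsh]
  exact ⟨hA.trans hB.symm, roundN^[8] (f ^^^ bn), hB, iterate_roundN_lt 8 _ hxlt⟩

lemma fold_eq : ∀ (data : List Int) (f : Nat), f < 65536 →
    data.foldl crcStepA (f : Int) = data.foldl crcStepB (f : Int) := by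
  intro data
  induction data with
  | nil => intro f _; rfl
  | cons b rest ih =>
    intro f hf
    obtain ⟨hAB, g, hg, hglt⟩ := step_eq f hf b
    simp only [List.foldl_cons, hAB, hg]
    exact ih g hglt

-- ===== VERDICT (by name: the statement is the Claim_ definition above) =====
theorem calc_crc16_ccitt_py_spec : Claim_equal_calc_crc16_ccitt_py := by
  intro data _
  unfold Spec_calc_crc16_ccitt_py calc_crc16_ccitt_py calc_crc16_ccitt_py_alt
  have h : (0xFFFF : Int) = ((65535 : Nat) : Int) := by norm_num
  rw [h, fold_eq data 65535 (by norm_num)]
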